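-- pv_equiv track=rewrite | github.com/chaseez/CS312 | practice/fabinocci.py | f
-- ===== SOURCE A (Python) =====
-- def f(n):
--     if 0 <= n <= 2:
--         return 1
--
--     numbers = [1,1,1]
--     value = 0
--
--     for i in range(3, n + 1):
--         value += numbers[i-1] + numbers[i-2] * numbers[i-3]
--         numbers.append(value)
--         value = 0
--
--     return numbers[-1]
-- ===== SOURCE B (Python) =====
-- def _fm(k, memo):
--     if k <= 2:
--         return 1
--     if k in memo:
--         return memo[k]
--     v = _fm(k - 1, memo) + _fm(k - 2, memo) * _fm(k - 3, memo)
--     memo[k] = v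
--     return v
--
-- def f(n):
--     return _fm(n, {})
-- ===== Notes on version B (the rewrite author's own statement) =====
-- stated objective: alternative
-- what changed: B evaluates the nonlinear three-term recurrence by top-down memoized recursion (a dict memo threaded through recursive calls) instead of A's bottom-up tabulation that grows an indexed list with a reset accumulator.
import Mathlib
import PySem

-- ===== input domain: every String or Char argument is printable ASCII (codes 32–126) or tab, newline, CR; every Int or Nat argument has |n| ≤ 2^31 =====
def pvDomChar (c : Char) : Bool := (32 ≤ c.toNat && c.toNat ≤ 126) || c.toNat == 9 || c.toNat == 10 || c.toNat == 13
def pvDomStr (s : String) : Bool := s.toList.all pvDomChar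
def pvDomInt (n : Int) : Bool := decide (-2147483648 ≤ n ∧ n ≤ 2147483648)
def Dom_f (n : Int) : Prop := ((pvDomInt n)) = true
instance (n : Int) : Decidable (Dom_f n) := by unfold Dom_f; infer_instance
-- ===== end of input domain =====

-- B evaluates the recurrence top-down by memoized recursion instead of A's bottom-up list tabulation.

-- ===== PORT A =====
-- loop body of A: value += numbers[i-1] + numbers[i-2]*numbers[i-3]; numbers.append(value); value = 0
-- (indices i-1, i-2, i-3 are always in range here, so pyGetD is exact)
def stepA (st : List Int × Int) (i : Int) : List Int × Int :=
  let value := st.2 + (PySem.List.pyGetD st.1 (i-1) 0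
      + PySem.List.pyGetD st.1 (i-2) 0 * PySem.List.pyGetD st.1 (i-3) 0)
  (st.1 ++ [value], 0)

def f (n : Int) : Int :=
  if 0 ≤ n ∧ n ≤ 2 then 1
  else  -- numbers[-1]; the list is never empty, so pyGetD is exact
    PySem.List.pyGetD ((PySem.List.pyRange 3 (n+1) 1).foldl stepA ([1, 1, 1], 0)).1 (-1) 0

-- ===== PORT B =====
-- _fm(k, memo): memoized top-down recursion; the Python mutates memo, the port threads it
def fm (k : Int) (memo : PySem.Dict Int Int) : Int × PySem.Dict Int Int :=
  if k ≤ 2 then (1, memo)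
  else
    match PySem.Dict.get? memo k with  -- 'if k in memo: return memo[k]'
    | some v => (v, memo)
    | none =>
      let p1 := fm (k - 1) memo
      let p2 := fm (k - 2) p1.2
      let p3 := fm (k - 3) p2.2
      let v := p1.1 + p2.1 * p3.1
      (v, PySem.Dict.insert p3.2 k v)
termination_by k.toNat
decreasing_by all_goals omega

def f_alt (n : Int) : Int := (fm n PySem.Dict.empty).1

-- ===== PRECONDITION & SPEC =====
def Spec_f (n : Int) (out : Int) : Prop := out = f_alt n
instance (n : Int) (out : Int) : Decidable (Spec_f n out) := by unfold Spec_f; infer_instance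

-- ===== CLAIM (what is proved, stated in full; the proofs are below) =====
def Claim_equal_f : Prop := ∀ (n : Int), Dom_f n → Spec_f n (f n)

-- ===== LEMMAS AND PROOFS =====

-- the mathematical recurrence both programs compute (proof helper only)
def g (k : Int) : Int :=
  if k ≤ 2 then 1 else g (k - 1) + g (k - 2) * g (k - 3)
termination_by k.toNat
decreasing_by all_goals omega

lemma g_base {k : Int} (h : k ≤ 2) : g k = 1 := by rw [g, if_pos h]

lemma g_rec {k : Int} (h : ¬ k ≤ 2) : g k = g (k - 1) + g (k - 2) * g (k - 3) := by
  rw [g, if_neg h]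

-- ---- B side: fm with a valid memo computes g and keeps the memo valid ----

def ValidMemo (m : PySem.Dict Int Int) : Prop :=
  ∀ i v, m.get? i = some v → v = g i

lemma fm_correct : ∀ (N : Nat) (k : Int), k.toNat ≤ N → ∀ m : PySem.Dict Int Int,
    ValidMemo m → (fm k m).1 = g k ∧ ValidMemo (fm k m).2 := by
  intro N
  induction N with
  | zero =>
    intro k hk m hm
    have hk2 : k ≤ 2 := by omega
    rw [fm, if_pos hk2, g_base hk2]
    exact ⟨rfl, hm⟩
  | succ N ih =>
    intro k hk m hm
    by_cases hk2 : k ≤ 2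
    · rw [fm, if_pos hk2, g_base hk2]
      exact ⟨rfl, hm⟩
    · rw [fm, if_neg hk2]
      rcases hg : PySem.Dict.get? m k with _ | v
      · simp only
        obtain ⟨h1, hm1⟩ := ih (k - 1) (by omega) m hm
        obtain ⟨h2, hm2⟩ := ih (k - 2) (by omega) _ hm1
        obtain ⟨h3, hm3⟩ := ih (k - 3) (by omega) _ hm2
        refine ⟨?_, ?_⟩
        · rw [h1, h2, h3, g_rec hk2]
        · intro i v hv
          rw [PySem.Dict.get?_insert] at hv
          split_ifs at hv with hik
          · cases hv
            rw [h1, h2, h3, hik, g_rec hk2]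
          · exact hm3 i v hv
      · exact ⟨hm k v hg, hm⟩

lemma empty_valid : ValidMemo (PySem.Dict.empty : PySem.Dict Int Int) := by
  intro i v hv
  simp [PySem.Dict.empty, PySem.Dict.get?] at hv

lemma f_alt_eq_g (n : Int) : f_alt n = g n :=
  (fm_correct n.toNat n le_rfl PySem.Dict.empty empty_valid).1

-- ---- A side: the tabulation loop computes g bottom-up ----

-- the last three tabulated values, advanced one step (proof helper, not part of either port)
def stepT (s : Int × Int × Int) : Int × Int × Int :=
  (s.2.1, s.2.2, s.2.2 + s.2.1 * s.1)

def iterT : Nat → (Int × Int × Int) → (Int × Int × Int)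
  | 0, s => s
  | k+1, s => iterT k (stepT s)

lemma getD_app3_0 (L : List Int) (a b c : Int) :
    (L ++ [a, b, c]).getD L.length 0 = a := by
  simp [List.getD]

lemma getD_app3_1 (L : List Int) (a b c : Int) :
    (L ++ [a, b, c]).getD (L.length + 1) 0 = b := by
  simp [List.getD]

lemma getD_app3_2 (L : List Int) (a b c : Int) :
    (L ++ [a, b, c]).getD (L.length + 2) 0 = c := by
  simp [List.getD]

lemma loop_inv : ∀ (k : Nat) (M : List Int) (a b c : Int),
    ∃ M' : List Int, M'.length = M.length + k ∧
      (PySem.List.pyRange ((M.length : Int) + 3) ((M.length : Int) + 3 + k) 1).foldl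
          stepA (M ++ [a, b, c], 0)
        = (M' ++ [(iterT k (a, b, c)).1, (iterT k (a, b, c)).2.1, (iterT k (a, b, c)).2.2], 0) := by
  intro k
  induction k with
  | zero =>
    intro M a b c
    refine ⟨M, by simp, ?_⟩
    rw [PySem.List.pyRange_one_eq_nil (by omega)]
    simp [iterT]
  | succ k ih =>
    intro M a b c
    rw [PySem.List.pyRange_one_cons (by omega)]
    rw [List.foldl_cons]
    have hstep : stepA (M ++ [a, b, c], 0) ((M.length : Int) + 3)
        = ((M ++ [a]) ++ [b, c, c + b * a], 0) := by
      unfold stepA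
      have h1 : (M.length : Int) + 3 - 1 = ((M.length + 2 : Nat) : Int) := by push_cast; ring
      have h2 : (M.length : Int) + 3 - 2 = ((M.length + 1 : Nat) : Int) := by push_cast; ring
      have h3 : (M.length : Int) + 3 - 3 = ((M.length : Nat) : Int) := by push_cast; ring
      simp only [h1, h2, h3, PySem.List.pyGetD_natCast]
      rw [getD_app3_0, getD_app3_1, getD_app3_2]
      simp
    rw [hstep]
    obtain ⟨M', hlen, heq⟩ := ih (M ++ [a]) b c (c + b * a)
    have hrange : PySem.List.pyRange ((M.length : Int) + 3 + 1) ((M.length : Int) + 3 + ((k + 1 : Nat) : Int)) 1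
        = PySem.List.pyRange (((M ++ [a]).length : Int) + 3) (((M ++ [a]).length : Int) + 3 + (k : Int)) 1 := by
      have h : ((M ++ [a]).length : Int) = (M.length : Int) + 1 := by simp
      rw [h]; congr 1 <;> push_cast <;> omega
    refine ⟨M', by simp at hlen ⊢; omega, ?_⟩
    rw [hrange, heq]
    have hiter : iterT (k + 1) (a, b, c) = iterT k (b, c, c + b * a) := by simp [iterT, stepT]
    rw [hiter]

lemma iterT_g : ∀ (k : Nat) (j : Int), 0 ≤ j →
    iterT k (g j, g (j + 1), g (j + 2)) = (g (j + k), g (j + k + 1), g (j + k + 2)) := by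
  intro k
  induction k with
  | zero => intro j _; simp [iterT]
  | succ k ih =>
    intro j hj
    have h3 : g (j + 3) = g (j + 2) + g (j + 1) * g j := by
      rw [g_rec (by omega), show j + 3 - 1 = j + 2 by ring,
        show j + 3 - 2 = j + 1 by ring, show j + 3 - 3 = j by ring]
    have hstep : stepT (g j, g (j + 1), g (j + 2)) = (g (j + 1), g (j + 1 + 1), g (j + 1 + 2)) := by
      unfold stepT
      simp only
      rw [show j + 1 + 1 = j + 2 by ring, show j + 1 + 2 = j + 3 by ring, h3]
    show iterT k (stepT (g j, g (j + 1), g (j + 2))) = _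
    rw [hstep, ih (j + 1) (by omega)]
    push_cast
    ring_nf

lemma f_eq_g (n : Int) : f n = g n := by
  by_cases h2 : n ≤ 2
  · unfold f
    by_cases h0 : 0 ≤ n
    · rw [if_pos ⟨h0, h2⟩, g_base h2]
    · rw [if_neg (by omega)]
      rw [PySem.List.pyRange_one_eq_nil (by omega)]
      rw [g_base h2]
      simp
      decide
  · unfold f
    rw [if_neg (by omega)]
    set k : Nat := (n - 2).toNat with hk
    have hkc : ((k : Int)) = n - 2 := by omega
    obtain ⟨M', hlen, heq⟩ := loop_inv k [] 1 1 1
    have hrange : PySem.List.pyRange 3 (n + 1) 1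
        = PySem.List.pyRange ((([] : List Int).length : Int) + 3) ((([] : List Int).length : Int) + 3 + k) 1 := by
      congr 1 <;> simp <;> omega
    simp only [List.nil_append] at heq
    rw [hrange, heq]
    rw [show M' ++ [(iterT k (1,1,1)).1, (iterT k (1,1,1)).2.1, (iterT k (1,1,1)).2.2]
        = (M' ++ [(iterT k (1,1,1)).1, (iterT k (1,1,1)).2.1]) ++ [(iterT k (1,1,1)).2.2] from by simp]
    rw [PySem.List.pyGetD_neg_one_append_singleton]
    have h111 : ((1 : Int), (1 : Int), (1 : Int)) = (g 0, g (0 + 1), g (0 + 2)) := by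
      rw [g_base (by omega), g_base (by omega), g_base (by omega)]
    rw [h111, iterT_g k 0 le_rfl]
    simp only
    congr 1
    omega

-- ===== VERDICT (by name: the statement is the Claim_ definition above) =====
theorem f_spec : Claim_equal_f := by
  intro n _
  unfold Spec_f
  rw [f_eq_g, f_alt_eq_g]
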